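-- pv_equiv track=rewrite | github.com/matheus-sc/cryptographic-scheme | asi2.py | _reverse_xor_with_feedback
-- ===== SOURCE A (Python) =====
-- def _reverse_xor_with_feedback(
--     data: list[int], round_key: list[int], initialization_vector: list[int]
-- ) -> list[int]:
--     """Reverte a operação de XOR com feedback."""
--     history = initialization_vector.copy()
--     result = []
--
--     for index in range(len(data)):
--         feedback = 0
--         for history_bit in history:
--             feedback ^= history_bit
--
--         message_bit = data[index] ^ round_key[index] ^ feedback
--         result.append(message_bit)
--         history = history[1:] + [data[index]]
--
--     return result
-- ===== SOURCE B (Python) =====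
-- def _reverse_xor_with_feedback(
--     data: list[int], round_key: list[int], initialization_vector: list[int]
-- ) -> list[int]:
--     """Reverte a operacao de XOR com feedback, mantendo o XOR da janela incrementalmente."""
--     feedback = 0
--     for bit in initialization_vector:
--         feedback ^= bit
--     window = list(initialization_vector)
--     head = 0
--     result = []
--     for d, k in zip(data, round_key):
--         result.append(d ^ k ^ feedback)
--         if head < len(window):
--             feedback ^= window[head]
--             head += 1
--         window.append(d)
--         feedback ^= d
--     return result
-- ===== Notes on version B (the rewrite author's own statement) =====
-- stated objective: faster
-- what changed: B replaces the O(k) re-fold of the whole history window at every step by an incrementally maintained running XOR (XOR out the departing element via a head pointer, XOR in the arriving data element), iterating over zip(data, round_key) instead of indices.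
import Mathlib
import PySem

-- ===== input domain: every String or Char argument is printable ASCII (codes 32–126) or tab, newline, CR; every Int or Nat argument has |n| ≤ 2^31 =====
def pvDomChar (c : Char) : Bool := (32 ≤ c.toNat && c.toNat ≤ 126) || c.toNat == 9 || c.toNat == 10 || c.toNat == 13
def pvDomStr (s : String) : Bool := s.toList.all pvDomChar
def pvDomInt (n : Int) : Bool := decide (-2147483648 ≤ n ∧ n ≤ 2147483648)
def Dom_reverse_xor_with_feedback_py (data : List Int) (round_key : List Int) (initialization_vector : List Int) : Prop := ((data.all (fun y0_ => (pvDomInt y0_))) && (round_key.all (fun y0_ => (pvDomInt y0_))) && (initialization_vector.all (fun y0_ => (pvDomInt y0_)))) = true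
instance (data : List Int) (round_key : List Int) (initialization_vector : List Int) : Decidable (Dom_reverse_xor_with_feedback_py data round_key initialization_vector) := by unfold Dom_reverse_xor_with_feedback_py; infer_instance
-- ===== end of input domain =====

-- B maintains the sliding-window XOR incrementally (XOR out the departing element, XOR in the
-- arriving one) instead of re-folding the whole window at every step: O(n+k) instead of O(n*k).


-- ===== PORT A =====
-- the 'for index in range(len(data))' loop; the inner 'for history_bit in history' is the foldl
def reverse_xor_with_feedback_py_loop (data round_key : List Int) (idxs : List Int)
    (history result : List Int) : List Int :=
  match idxs with
  | [] => result
  | index :: rest =>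
    let feedback := history.foldl (fun f h => PySem.Int.bxor f h) 0
    match PySem.List.pyGet? data index, PySem.List.pyGet? round_key index with
    | some d, some k =>
        reverse_xor_with_feedback_py_loop data round_key rest
          (PySem.List.slice history (some 1) none ++ [d])
          (result ++ [PySem.Int.bxor (PySem.Int.bxor d k) feedback])
    | _, _ => result  -- IndexError in Python; excluded by Pre_

def reverse_xor_with_feedback_py (data : List Int) (round_key : List Int) (initialization_vector : List Int) : List Int :=
  reverse_xor_with_feedback_py_loop data round_key
    (PySem.List.pyRange 0 (data.length : Int) 1) initialization_vector []

-- ===== PORT B =====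
-- the 'for d, k in zip(data, round_key)' loop of Source B, with its (feedback, window, head) state
def reverse_xor_with_feedback_py_alt_loop (pairs : List (Int × Int)) (feedback : Int)
    (window : List Int) (head : Nat) (result : List Int) : List Int :=
  match pairs with
  | [] => result
  | (d, k) :: rest =>
    let result := result ++ [PySem.Int.bxor (PySem.Int.bxor d k) feedback]
    let st :=
      if head < window.length then (PySem.Int.bxor feedback (window.getD head 0), head + 1)
      else (feedback, head)
    reverse_xor_with_feedback_py_alt_loop rest (PySem.Int.bxor st.1 d) (window ++ [d]) st.2 result

def reverse_xor_with_feedback_py_alt (data : List Int) (round_key : List Int) (initialization_vector : List Int) : List Int :=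
  reverse_xor_with_feedback_py_alt_loop (data.zip round_key)
    (initialization_vector.foldl (fun f b => PySem.Int.bxor f b) 0)
    initialization_vector 0 []

-- ===== PRECONDITION & SPEC =====
-- Pre_ excludes only the inputs where A raises IndexError (round_key shorter than data).
def Pre_reverse_xor_with_feedback_py (data : List Int) (round_key : List Int) (initialization_vector : List Int) : Prop :=
  data.length ≤ round_key.length
instance (data : List Int) (round_key : List Int) (initialization_vector : List Int) : Decidable (Pre_reverse_xor_with_feedback_py data round_key initialization_vector) := by unfold Pre_reverse_xor_with_feedback_py; infer_instance

def pvWitness_reverse_xor_with_feedback_py : List Int × List Int × List Int :=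
  ([1, 2, 3], [4, 5, 6], [7, 9])

def Spec_reverse_xor_with_feedback_py (data : List Int) (round_key : List Int) (initialization_vector : List Int) (out : List Int) : Prop := out = reverse_xor_with_feedback_py_alt data round_key initialization_vector
instance (data : List Int) (round_key : List Int) (initialization_vector : List Int) (out : List Int) : Decidable (Spec_reverse_xor_with_feedback_py data round_key initialization_vector out) := by unfold Spec_reverse_xor_with_feedback_py; infer_instance

-- ===== CLAIM (what is proved, stated in full; the proofs are below) =====
def Claim_equal_reverse_xor_with_feedback_py : Prop := ∀ (data : List Int) (round_key : List Int) (initialization_vector : List Int), Dom_reverse_xor_with_feedback_py data round_key initialization_vector → Pre_reverse_xor_with_feedback_py data round_key initialization_vector → Spec_reverse_xor_with_feedback_py data round_key initialization_vector (reverse_xor_with_feedback_py data round_key initialization_vector)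

-- ===== LEMMAS AND PROOFS =====

theorem pv_bxor_nn (m n : Nat) : PySem.Int.bxor (↑m) (Int.negSucc n) = Int.negSucc (m ^^^ n) := by
  have h2 : (-(Int.negSucc n) - 1).toNat = n := by omega
  simp [PySem.Int.bxor, h2, Int.negSucc_eq]; omega

theorem pv_bxor_ns (m n : Nat) : PySem.Int.bxor (Int.negSucc m) (↑n) = Int.negSucc (m ^^^ n) := by
  have h2 : (-(Int.negSucc m) - 1).toNat = m := by omega
  simp [PySem.Int.bxor, h2, Int.negSucc_eq]; omega

theorem pv_bxor_ss (m n : Nat) : PySem.Int.bxor (Int.negSucc m) (Int.negSucc n) = ↑(m ^^^ n) := by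
  have h1 : ¬ (0:Int) ≤ Int.negSucc m := by omega
  have h2 : ¬ (0:Int) ≤ Int.negSucc n := by omega
  have h3 : (-(Int.negSucc m) - 1).toNat = m := by omega
  have h4 : (-(Int.negSucc n) - 1).toNat = n := by omega
  simp [PySem.Int.bxor, h1, h2, h3, h4]

theorem pv_bxor_oo (m n : Nat) : PySem.Int.bxor (↑m) (↑n) = ((↑(m ^^^ n)) : Int) := by
  simp [PySem.Int.bxor]

theorem pv_bxor_assoc (a b c : Int) :
    PySem.Int.bxor (PySem.Int.bxor a b) c = PySem.Int.bxor a (PySem.Int.bxor b c) := by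
  rcases a with a|a <;> rcases b with b|b <;> rcases c with c|c <;>
    simp only [Int.ofNat_eq_natCast, pv_bxor_nn, pv_bxor_ns, pv_bxor_ss, pv_bxor_oo, Nat.xor_assoc]

theorem pv_bxor_cancel (a x : Int) : PySem.Int.bxor (PySem.Int.bxor a x) a = x := by
  rw [PySem.Int.bxor_comm a x, pv_bxor_assoc, PySem.Int.bxor_self, PySem.Int.bxor_zero]

theorem pv_zero_bxor (a : Int) : PySem.Int.bxor 0 a = a := by
  rw [PySem.Int.bxor_comm, PySem.Int.bxor_zero]

-- shifting the initial accumulator of an XOR fold out of the fold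
theorem pv_foldl_bxor_shift (l : List Int) (x : Int) :
    l.foldl (fun f h => PySem.Int.bxor f h) x
      = PySem.Int.bxor x (l.foldl (fun f h => PySem.Int.bxor f h) 0) := by
  induction l generalizing x with
  | nil => simp [PySem.Int.bxor_zero]
  | cons a t ih =>
    simp only [List.foldl_cons]
    rw [ih (PySem.Int.bxor x a), ih (PySem.Int.bxor 0 a), pv_zero_bxor, pv_bxor_assoc]

-- proof-only structural form of A's loop (recursion on the data/key pairs instead of indices)
def pvARec (pairs : List (Int × Int)) (history result : List Int) : List Int :=
  match pairs with
  | [] => result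
  | (d, k) :: rest =>
      pvARec rest (history.drop 1 ++ [d])
        (result ++ [PySem.Int.bxor (PySem.Int.bxor d k)
          (history.foldl (fun f h => PySem.Int.bxor f h) 0)])

-- A's index loop equals the structural recursion over the remaining pairs
theorem pv_loopA_eq_rec (data round_key : List Int) (hlen : data.length ≤ round_key.length) :
    ∀ (m j : Nat), j + m = data.length → ∀ (history result : List Int),
      reverse_xor_with_feedback_py_loop data round_key
          (PySem.List.pyRange (j : Int) (data.length : Int) 1) history result
        = pvARec ((data.drop j).zip (round_key.drop j)) history result := by
  intro m
  induction m with
  | zero =>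
    intro j hj history result
    have h1 : PySem.List.pyRange (j : Int) (data.length : Int) 1 = [] := by
      simp [PySem.List.pyRange]; omega
    have h2 : data.drop j = [] := by
      apply List.drop_eq_nil_of_le; omega
    rw [h1, h2]
    simp [reverse_xor_with_feedback_py_loop, pvARec]
  | succ m ih =>
    intro j hj history result
    have hjlt : j < data.length := by omega
    have hjk : j < round_key.length := by omega
    have h1 : PySem.List.pyRange (j : Int) (data.length : Int) 1
        = (j : Int) :: PySem.List.pyRange ((j : Int) + 1) (data.length : Int) 1 := by
      apply PySem.List.pyRange_one_cons; omega
    rw [h1]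
    simp only [reverse_xor_with_feedback_py_loop]
    rw [PySem.List.pyGet?_natCast data j, PySem.List.pyGet?_natCast round_key j]
    have hd : data[j]? = some data[j] := List.getElem?_eq_getElem hjlt
    have hk : round_key[j]? = some round_key[j] := List.getElem?_eq_getElem hjk
    rw [hd, hk]
    have hdrop : data.drop j = data[j] :: data.drop (j + 1) := List.drop_eq_getElem_cons hjlt
    have hkdrop : round_key.drop j = round_key[j] :: round_key.drop (j + 1) :=
      List.drop_eq_getElem_cons hjk
    rw [hdrop, hkdrop]
    simp only [List.zip_cons_cons, pvARec]
    have := ih (j + 1) (by omega)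
    have hcast : ((j : Int) + 1) = ((j + 1 : Nat) : Int) := by push_cast; ring
    rw [hcast, this]
    have hs : PySem.List.slice history (some 1) none = history.drop 1 := by
      simpa using PySem.List.slice_from_natCast history 1
    rw [hs]

-- the sliding-window invariant: B's loop with (window, head, feedback = XOR of window.drop head)
-- computes exactly the structural form of A's loop on history = window.drop head
theorem pv_rec_eq_alt (pairs : List (Int × Int)) :
    ∀ (window : List Int) (head : Nat) (result : List Int), head ≤ window.length →
      pvARec pairs (window.drop head) result
        = reverse_xor_with_feedback_py_alt_loop pairs
            ((window.drop head).foldl (fun f h => PySem.Int.bxor f h) 0) window head result := by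
  induction pairs with
  | nil => intro window head result _; simp [pvARec, reverse_xor_with_feedback_py_alt_loop]
  | cons p rest ih =>
    obtain ⟨d, k⟩ := p
    intro window head result hh
    simp only [pvARec, reverse_xor_with_feedback_py_alt_loop]
    by_cases hlt : head < window.length
    · rw [if_pos hlt]
      have hget : window.getD head 0 = window[head] := List.getD_eq_getElem window 0 hlt
      have hdrop : window.drop head = window[head] :: window.drop (head + 1) :=
        List.drop_eq_getElem_cons hlt
      have hfb : PySem.Int.bxor
            ((window.drop head).foldl (fun f h => PySem.Int.bxor f h) 0) window[head]
          = (window.drop (head + 1)).foldl (fun f h => PySem.Int.bxor f h) 0 := by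
        rw [hdrop]
        simp only [List.foldl_cons]
        rw [pv_zero_bxor, pv_foldl_bxor_shift, pv_bxor_cancel]
      have happ : (window ++ [d]).drop (head + 1) = window.drop (head + 1) ++ [d] :=
        List.drop_append_of_le_length (by omega)
      have hxor2 : PySem.Int.bxor
            ((window.drop (head + 1)).foldl (fun f h => PySem.Int.bxor f h) 0) d
          = ((window ++ [d]).drop (head + 1)).foldl (fun f h => PySem.Int.bxor f h) 0 := by
        rw [happ, List.foldl_append]
        simp only [List.foldl_cons, List.foldl_nil]
      have hhist : (window.drop head).drop 1 ++ [d] = (window ++ [d]).drop (head + 1) := by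
        rw [happ, List.drop_drop]
      rw [hhist, ih (window ++ [d]) (head + 1) _ (by simp; omega), hget, hfb, hxor2]
    · rw [if_neg hlt]
      have heq : head = window.length := by omega
      have happ : List.drop head (window ++ [d]) = [d] := by rw [heq]; simp
      have hhist : (List.drop head window).drop 1 ++ [d] = List.drop head (window ++ [d]) := by
        rw [heq]; simp
      have hfb : PySem.Int.bxor
            ((window.drop head).foldl (fun f h => PySem.Int.bxor f h) 0) d
          = ((window ++ [d]).drop head).foldl (fun f h => PySem.Int.bxor f h) 0 := by
        rw [heq]; simp [pv_zero_bxor]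
      rw [hhist, hfb, ih (window ++ [d]) head]
      simp; omega

-- ===== VERDICT (by name: the statement is the Claim_ definition above) =====
theorem reverse_xor_with_feedback_py_spec : Claim_equal_reverse_xor_with_feedback_py := by
  intro data round_key iv _ hpre
  unfold Spec_reverse_xor_with_feedback_py
  unfold reverse_xor_with_feedback_py reverse_xor_with_feedback_py_alt
  have h0 : ((0 : Nat) : Int) = (0 : Int) := rfl
  rw [← h0, pv_loopA_eq_rec data round_key hpre data.length 0 (by omega) iv []]
  simp only [List.drop_zero]
  have := pv_rec_eq_alt (data.zip round_key) iv 0 [] (by omega)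
  simp only [List.drop_zero] at this
  rw [this]
  rfl
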